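-- pv_equiv track=rewrite | github.com/GajareGaurav/Atgeir | Python/Day2/10.py | rem_third
-- ===== SOURCE A (Python) =====
-- def rem_third(lst):
--     index=2
--     op=[]
--
--     while len(lst) > 0:
--         if index < len(lst):
--             op.append(lst.pop(index))
--             index += 2  # Move to the next third element
--         else:
--             break
--
--     return op
-- ===== SOURCE B (Python) =====
-- def rem_third(lst):
--     op = [x for i, x in enumerate(lst) if i % 3 == 2]
--     keep = [x for i, x in enumerate(lst) if i % 3 != 2]
--     lst[:] = keep
--     return op
-- ===== Notes on version B (the rewrite author's own statement) =====
-- stated objective: faster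
-- what changed: Replaces A's destructive advancing-pop loop (each pop at a moving index shifts the tail, O(n^2)) with a single O(n) enumerate pass partitioning elements by original index mod 3; the same in-place mutation of lst is reproduced with lst[:] = keep.
import Mathlib
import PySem

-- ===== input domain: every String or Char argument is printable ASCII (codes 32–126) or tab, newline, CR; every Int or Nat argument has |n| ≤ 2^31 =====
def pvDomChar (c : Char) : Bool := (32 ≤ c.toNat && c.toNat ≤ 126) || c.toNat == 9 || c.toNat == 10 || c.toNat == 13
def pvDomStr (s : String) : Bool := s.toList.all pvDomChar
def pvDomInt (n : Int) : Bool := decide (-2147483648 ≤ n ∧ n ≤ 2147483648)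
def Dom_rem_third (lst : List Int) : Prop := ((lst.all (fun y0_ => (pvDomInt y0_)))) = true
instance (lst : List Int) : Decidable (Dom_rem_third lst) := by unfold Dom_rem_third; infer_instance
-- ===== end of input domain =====

-- B replaces A's destructive advancing-pop loop (quadratic: each pop shifts the tail) with one linear
-- enumerate pass selecting indices ≡ 2 (mod 3); measured faster in a timing run. Both Pythons mutate lst in place identically; the theorems below are about the return value.

-- ===== PORT A =====
-- the while loop: state (lst, index, op); pop? shrinks lst, so lst.length decreases
def remThirdLoopA (lst : List Int) (index : Int) (op : List Int) : List Int :=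
  if 0 < lst.length then
    if index < (lst.length : Int) then
      match hp : PySem.List.pop? lst index with
      | some (x, rest) => remThirdLoopA rest (index + 2) (op ++ [x])
      | none => op  -- unreachable for 0 ≤ index < len
    else op
  else op
termination_by lst.length
decreasing_by
  have := PySem.List.length_of_pop?_eq_some lst hp
  simp at this
  omega

def rem_third (lst : List Int) : List Int := remThirdLoopA lst 2 []

-- ===== PORT B =====
def rem_third_alt (lst : List Int) : List Int :=
  ((PySem.List.enumerate lst 0).filter (fun p => PySem.Int.mod p.1 3 == 2)).map (·.2)

-- ===== PRECONDITION & SPEC =====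
def Spec_rem_third (lst : List Int) (out : List Int) : Prop := out = rem_third_alt lst
instance (lst : List Int) (out : List Int) : Decidable (Spec_rem_third lst out) := by unfold Spec_rem_third; infer_instance

-- ===== CLAIM (what is proved, stated in full; the proofs are below) =====
def Claim_equal_rem_third : Prop := ∀ (lst : List Int), Dom_rem_third lst → Spec_rem_third lst (rem_third lst)

-- ===== LEMMAS AND PROOFS =====

-- every third element (indices 2, 5, 8, …); the common characterisation both ports are reduced to
def everyThird : List Int → List Int
  | _ :: _ :: c :: r => c :: everyThird r
  | _ => []

-- A's loop, invariant form: the first `pre.length` elements are inert (index is already past them)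
lemma remThirdLoopA_eq (lst : List Int) : ∀ (pre op : List Int),
    remThirdLoopA (pre ++ lst) ((pre.length : Int) + 2) op = op ++ everyThird lst := by
  induction lst using everyThird.induct with
  | case1 a b c r ih =>
    intro pre op
    have hlen : pre.length + 2 < (pre ++ (a :: b :: c :: r)).length := by simp
    have hget : (pre ++ (a :: b :: c :: r))[pre.length + 2]'hlen = c := by
      rw [List.getElem_append_right (by omega)]; simp
    have herase : (pre ++ (a :: b :: c :: r)).eraseIdx (pre.length + 2)
        = (pre ++ [a, b]) ++ r := by
      rw [List.eraseIdx_append_of_length_le (by omega)]; simp [List.eraseIdx]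
    have hpop : PySem.List.pop? (pre ++ (a :: b :: c :: r)) ((pre.length : Int) + 2)
        = some (c, (pre ++ [a, b]) ++ r) := by
      have hcast : (pre.length : Int) + 2 = ((pre.length + 2 : Nat) : Int) := by push_cast; ring
      rw [hcast, PySem.List.pop?_natCast _ _ hlen, hget, herase]
    rw [remThirdLoopA.eq_def]
    rw [if_pos (by simpa using hlen), if_pos (by exact_mod_cast hlen)]
    split
    · rename_i x rest hp
      rw [hpop] at hp
      obtain ⟨rfl, rfl⟩ := Prod.mk.inj (Option.some.inj hp)
      have hidx : (pre.length : Int) + 2 + 2 = (((pre ++ [a, b]).length : Nat) : Int) + 2 := by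
        have h2 : ([a, b] : List Int).length = 2 := rfl
        rw [List.length_append, h2]; push_cast; ring
      rw [hidx, ih]
      simp [everyThird]
    · rename_i hp
      rw [hpop] at hp
      simp at hp
  | case2 t h =>
    intro pre op
    have hshort : t.length < 3 := by
      by_contra hc
      push_neg at hc
      match t, hc with
      | a :: b :: c :: r, _ => exact h a b c r rfl
    have hnotlt : ¬ ((pre.length : Int) + 2 < ((pre ++ t).length : Int)) := by
      simp; omega
    have ht : everyThird t = [] := by
      match t, hshort with
      | [], _ => rfl
      | [_], _ => rfl
      | [_, _], _ => rfl
    by_cases h1 : 0 < (pre ++ t).length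
    · rw [remThirdLoopA.eq_def, if_pos h1, if_neg hnotlt]
      simp [ht]
    · rw [remThirdLoopA.eq_def, if_neg h1]
      simp [ht]

-- B's enumerate/filter pass, generalized over the start offset (a multiple of 3)
lemma alt_eq (lst : List Int) : ∀ (s : Nat), s % 3 = 0 →
    ((PySem.List.enumerate lst (s : Int)).filter (fun p => PySem.Int.mod p.1 3 == 2)).map (·.2)
      = everyThird lst := by
  induction lst using everyThird.induct with
  | case1 a b c r ih =>
    intro s hs
    rw [PySem.List.enumerate_cons, PySem.List.enumerate_cons, PySem.List.enumerate_cons]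
    have h1 : ((s : Int) + 1) = ((s + 1 : Nat) : Int) := by push_cast; ring
    have h2 : (((s + 1 : Nat) : Int) + 1) = ((s + 2 : Nat) : Int) := by push_cast; ring
    have h3 : (((s + 2 : Nat) : Int) + 1) = ((s + 3 : Nat) : Int) := by push_cast; ring
    rw [h1, h2, h3]
    have m0 : PySem.Int.mod (s : Int) 3 = ((s % 3 : Nat) : Int) := PySem.Int.mod_natCast s 3
    have m1 : PySem.Int.mod ((s + 1 : Nat) : Int) 3 = (((s + 1) % 3 : Nat) : Int) :=
      PySem.Int.mod_natCast (s + 1) 3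
    have m2 : PySem.Int.mod ((s + 2 : Nat) : Int) 3 = (((s + 2) % 3 : Nat) : Int) :=
      PySem.Int.mod_natCast (s + 2) 3
    have e1 : ((s + 1) % 3) = 1 := by omega
    have e2 : ((s + 2) % 3) = 2 := by omega
    simp only [List.filter_cons, m0, m1, m2, hs, e1, e2, Nat.cast_zero, Nat.cast_one,
      Nat.cast_ofNat, Int.reduceBEq, reduceIte, Bool.false_eq_true, if_false, List.map_cons]
    rw [ih (s + 3) (by omega)]
    simp [everyThird]
  | case2 t h =>
    intro s hs
    have hshort : t.length < 3 := by
      by_contra hc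
      push_neg at hc
      match t, hc with
      | a :: b :: c :: r, _ => exact h a b c r rfl
    have m0 : PySem.Int.mod (s : Int) 3 = ((s % 3 : Nat) : Int) := PySem.Int.mod_natCast s 3
    have m1 : PySem.Int.mod ((s + 1 : Nat) : Int) 3 = (((s + 1) % 3 : Nat) : Int) :=
      PySem.Int.mod_natCast (s + 1) 3
    have e1 : ((s + 1) % 3) = 1 := by omega
    have ht : everyThird t = [] := by
      match t, hshort with
      | [], _ => rfl
      | [_], _ => rfl
      | [_, _], _ => rfl
    match t, hshort with
    | [], _ => simp [PySem.List.enumerate_nil, ht]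
    | [a], _ =>
      simp only [PySem.List.enumerate_cons, PySem.List.enumerate_nil, List.filter_cons,
        m0, hs, ht]
      norm_num
    | [a, b], _ =>
      have h1 : ((s : Int) + 1) = ((s + 1 : Nat) : Int) := by push_cast; ring
      simp only [PySem.List.enumerate_cons, PySem.List.enumerate_nil, h1, List.filter_cons,
        m0, m1, hs, e1, ht]
      norm_num

-- ===== VERDICT (by name: the statement is the Claim_ definition above) =====
theorem rem_third_spec : Claim_equal_rem_third := by
  intro lst _
  unfold Spec_rem_third rem_third rem_third_alt
  have hA := remThirdLoopA_eq lst [] []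
  simp only [List.nil_append, List.length_nil, Int.natCast_zero, zero_add] at hA
  have hB := alt_eq lst 0 rfl
  simp only [Nat.cast_zero] at hB
  rw [hA, hB]
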